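-- pv_equiv track=rewrite | github.com/C0ldstudy/Argus | loaders/split_optc.py | is_anomalous_node_range
-- ===== SOURCE A (Python) =====
-- def is_anomalous_node_range(d, node, ts):
--     if ts < 150885 or node not in d:
--         return False
--
--     times = d[node]
--     for time in times:
--         # Mark true if node appeared in a compromise in -/5min
--         if abs(ts-time) <= 300:
--             return True
--
--     return False
-- ===== SOURCE B (Python) =====
-- def _bisect_left(a, x):
--     # leftmost insertion point of x in sorted list a
--     lo, hi = 0, len(a)
--     while lo < hi:
--         mid = (lo + hi) // 2
--         if a[mid] < x:
--             lo = mid + 1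
--         else:
--             hi = mid
--     return lo
--
-- def is_anomalous_node_range(d, node, ts):
--     if ts < 150885 or node not in d:
--         return False
--     s = sorted(d[node])
--     i = _bisect_left(s, ts)
--     # nearest times are s[i] (smallest >= ts) and s[i-1] (largest < ts)
--     if i < len(s) and s[i] - ts <= 300:
--         return True
--     if i > 0 and ts - s[i - 1] <= 300:
--         return True
--     return False
-- ===== Notes on version B (the rewrite author's own statement) =====
-- stated objective: alternative
-- what changed: A linearly scans the time list for any time within 300s; B sorts the times and binary-searches for the insertion point of ts, then range-checks only the two neighbouring times (the nearest below and the nearest at/above ts).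
import Mathlib
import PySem

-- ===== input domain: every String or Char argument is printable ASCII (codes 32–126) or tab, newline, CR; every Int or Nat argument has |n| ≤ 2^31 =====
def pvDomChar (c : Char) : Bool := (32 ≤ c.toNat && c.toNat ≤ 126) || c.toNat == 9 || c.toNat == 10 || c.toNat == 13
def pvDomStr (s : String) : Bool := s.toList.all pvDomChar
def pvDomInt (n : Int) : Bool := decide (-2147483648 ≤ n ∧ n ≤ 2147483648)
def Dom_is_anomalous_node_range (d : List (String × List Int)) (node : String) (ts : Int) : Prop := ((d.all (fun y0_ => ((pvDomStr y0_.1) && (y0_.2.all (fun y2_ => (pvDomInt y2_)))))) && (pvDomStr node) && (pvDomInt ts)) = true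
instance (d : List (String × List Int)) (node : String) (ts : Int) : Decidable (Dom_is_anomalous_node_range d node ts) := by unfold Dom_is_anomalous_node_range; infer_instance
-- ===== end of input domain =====

-- B replaces A's linear scan of the time list by sort + hand-written binary search for ts's
-- insertion point, range-checking only the two neighbouring times; alternative algorithm.

-- ===== PORT A =====
-- the for-loop of A: early return True on the first time within 300, else False
def pvALoop (ts : Int) : List Int → Bool
  | [] => false
  | time :: rest => if |ts - time| ≤ 300 then true else pvALoop ts rest

def is_anomalous_node_range (d : List (String × List Int)) (node : String) (ts : Int) : Bool :=
  if ts < 150885 ∨ (PySem.Dict.mk d).contains node = false then false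
  else
    match (PySem.Dict.mk d).get? node with
    | none => false
    | some times => pvALoop ts times

-- ===== PORT B =====
-- Source B's hand-written _bisect_left, step for step: the while loop as structural recursion on
-- a fuel bounding hi - lo (the loop runs at most len(a) times; the fuel only makes it total);
-- a[mid] is accessed with 0 <= lo <= mid < hi <= len(a) only, where List.getD is exact.
def pvBisectGo (a : List Int) (x : Int) : Nat → Nat → Nat → Nat
  | 0, lo, _ => lo
  | fuel + 1, lo, hi =>
    if lo < hi then
      let mid := (lo + hi) / 2
      if a.getD mid 0 < x then pvBisectGo a x fuel (mid + 1) hi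
      else pvBisectGo a x fuel lo mid
    else lo

def pvBisectLeft (a : List Int) (x : Int) (lo hi : Nat) : Nat :=
  pvBisectGo a x (hi - lo) lo hi

def is_anomalous_node_range_alt (d : List (String × List Int)) (node : String) (ts : Int) : Bool :=
  if ts < 150885 ∨ (PySem.Dict.mk d).contains node = false then false
  else
    match (PySem.Dict.mk d).get? node with
    | none => false
    | some times =>
      let s := PySem.List.sorted times (fun t => t) false
      let i := pvBisectLeft s ts 0 s.length
      if i < s.length ∧ s.getD i 0 - ts ≤ 300 then true
      else if 0 < i ∧ ts - s.getD (i - 1) 0 ≤ 300 then true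
      else false

-- ===== PRECONDITION & SPEC =====
def Spec_is_anomalous_node_range (d : List (String × List Int)) (node : String) (ts : Int) (out : Bool) : Prop := out = is_anomalous_node_range_alt d node ts
instance (d : List (String × List Int)) (node : String) (ts : Int) (out : Bool) : Decidable (Spec_is_anomalous_node_range d node ts out) := by unfold Spec_is_anomalous_node_range; infer_instance

-- ===== CLAIM (what is proved, stated in full; the proofs are below) =====
def Claim_equal_is_anomalous_node_range : Prop := ∀ (d : List (String × List Int)) (node : String) (ts : Int), Dom_is_anomalous_node_range d node ts → Spec_is_anomalous_node_range d node ts (is_anomalous_node_range d node ts)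

-- ===== LEMMAS AND PROOFS =====
theorem pvALoop_eq_decide (ts : Int) (l : List Int) :
    pvALoop ts l = decide (∃ t ∈ l, |ts - t| ≤ 300) := by
  induction l with
  | nil => simp [pvALoop]
  | cons h t ih =>
    simp only [pvALoop, ih]
    by_cases hh : |ts - h| ≤ 300
    · simp [hh]
    · simp [hh]

-- monotone access into a (≤)-sorted list
theorem pv_getD_mono (a : List Int) (h : a.Pairwise (· ≤ ·)) {j k : Nat}
    (hjk : j ≤ k) (hk : k < a.length) : a.getD j 0 ≤ a.getD k 0 := by
  rcases lt_or_eq_of_le hjk with hlt | rfl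
  · have hj : j < a.length := lt_trans hlt hk
    rw [List.getD_eq_getElem _ _ hj, List.getD_eq_getElem _ _ hk]
    exact List.pairwise_iff_getElem.mp h j k hj hk hlt
  · exact le_refl _

-- the invariant of Source B's binary-search loop
theorem pvBisectGo_inv (a : List Int) (x : Int) (h : a.Pairwise (· ≤ ·)) :
    ∀ (fuel lo hi : Nat), hi - lo ≤ fuel → lo ≤ hi → hi ≤ a.length →
    (∀ j, j < lo → a.getD j 0 < x) →
    (∀ j, hi ≤ j → j < a.length → x ≤ a.getD j 0) →
    (pvBisectGo a x fuel lo hi ≤ a.length ∧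
     (∀ j, j < pvBisectGo a x fuel lo hi → a.getD j 0 < x) ∧
     (∀ j, pvBisectGo a x fuel lo hi ≤ j → j < a.length → x ≤ a.getD j 0)) := by
  intro fuel
  induction fuel with
  | zero =>
    intro lo hi hn hlh hhl hlow hhigh
    simp only [pvBisectGo]
    exact ⟨by omega, hlow, fun j hj hjl => hhigh j (by omega) hjl⟩
  | succ fuel ih =>
    intro lo hi hn hlh hhl hlow hhigh
    rw [pvBisectGo]
    by_cases hlt : lo < hi
    · simp only [hlt, if_true]
      set mid := (lo + hi) / 2 with hmid
      have hm1 : lo ≤ mid := by omega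
      have hm2 : mid < hi := by omega
      by_cases hc : a.getD mid 0 < x
      · simp only [hc, if_true]
        exact ih (mid + 1) hi (by omega) (by omega) hhl
          (fun j hj => lt_of_le_of_lt
            (pv_getD_mono a h (by omega) (by omega)) hc) hhigh
      · simp only [hc, if_false]
        exact ih lo mid (by omega) (by omega) (by omega) hlow
          (fun j hj hjl => le_trans (not_lt.mp hc) (pv_getD_mono a h hj hjl))
    · simp only [hlt, if_false]
      exact ⟨by omega, hlow, fun j hj hjl => hhigh j (by omega) hjl⟩

theorem pvBisectLeft_inv (a : List Int) (x : Int) (h : a.Pairwise (· ≤ ·)) :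
    ∀ (n lo hi : Nat), hi - lo = n → lo ≤ hi → hi ≤ a.length →
    (∀ j, j < lo → a.getD j 0 < x) →
    (∀ j, hi ≤ j → j < a.length → x ≤ a.getD j 0) →
    (pvBisectLeft a x lo hi ≤ a.length ∧
     (∀ j, j < pvBisectLeft a x lo hi → a.getD j 0 < x) ∧
     (∀ j, pvBisectLeft a x lo hi ≤ j → j < a.length → x ≤ a.getD j 0)) := by
  intro n lo hi _ hlh hhl hlow hhigh
  exact pvBisectGo_inv a x h (hi - lo) lo hi le_rfl hlh hhl hlow hhigh

-- the neighbour conditions after bisection are equivalent to A's existence test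
theorem pv_key (ts : Int) (times s : List Int) (hpw : s.Pairwise (· ≤ ·))
    (hmem : ∀ t, t ∈ s ↔ t ∈ times) :
    ((pvBisectLeft s ts 0 s.length < s.length ∧
        s.getD (pvBisectLeft s ts 0 s.length) 0 - ts ≤ 300) ∨
      (0 < pvBisectLeft s ts 0 s.length ∧
        ts - s.getD (pvBisectLeft s ts 0 s.length - 1) 0 ≤ 300)) ↔
    ∃ t ∈ times, |ts - t| ≤ 300 := by
  obtain ⟨hle, hlo, hhi⟩ := pvBisectLeft_inv s ts hpw (s.length - 0) 0 s.length rfl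
    (Nat.zero_le _) le_rfl (by omega) (by omega)
  set i := pvBisectLeft s ts 0 s.length with hidef
  constructor
  · rintro (⟨hil, hd⟩ | ⟨hip, hd⟩)
    · refine ⟨s.getD i 0, (hmem _).mp ?_, ?_⟩
      · rw [List.getD_eq_getElem _ _ hil]; exact List.getElem_mem hil
      · have := hhi i le_rfl hil
        rw [abs_sub_comm, abs_of_nonneg (by omega)]; omega
    · have hi1 : i - 1 < s.length := by omega
      refine ⟨s.getD (i - 1) 0, (hmem _).mp ?_, ?_⟩
      · rw [List.getD_eq_getElem _ _ hi1]; exact List.getElem_mem hi1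
      · have := hlo (i - 1) (by omega)
        rw [abs_of_nonneg (by omega)]; omega
  · rintro ⟨t, htm, habs⟩
    obtain ⟨k, hk, hkt⟩ := List.getElem_of_mem ((hmem t).mpr htm)
    have hgk : s.getD k 0 = t := by rw [List.getD_eq_getElem _ _ hk]; exact hkt
    by_cases hki : k < i
    · -- t = s[k] < ts, so the left neighbour s[i-1] is within 300 too
      have hip : 0 < i := by omega
      have hlt : s.getD k 0 < ts := hlo k hki
      have hmono : s.getD k 0 ≤ s.getD (i - 1) 0 :=
        pv_getD_mono s hpw (by omega) (by omega)
      have habs' : ts - t ≤ 300 := by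
        rw [abs_of_nonneg (by omega)] at habs; omega
      exact Or.inr ⟨hip, by omega⟩
    · have hil : i < s.length := by omega
      have hge : ts ≤ s.getD k 0 := hhi k (by omega) hk
      have hmono : s.getD i 0 ≤ s.getD k 0 := pv_getD_mono s hpw (by omega) hk
      have habs' : t - ts ≤ 300 := by
        rw [abs_sub_comm, abs_of_nonneg (by omega)] at habs; omega
      exact Or.inl ⟨hil, by omega⟩

-- B's match arm equals A's loop on any time list
theorem pv_inner_eq (ts : Int) (times : List Int) :
    (let s := PySem.List.sorted times (fun t => t) false
     let i := pvBisectLeft s ts 0 s.length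
     if i < s.length ∧ s.getD i 0 - ts ≤ 300 then true
     else if 0 < i ∧ ts - s.getD (i - 1) 0 ≤ 300 then true
     else false) = pvALoop ts times := by
  have hpw : (PySem.List.sorted times (fun t => t) false).Pairwise (· ≤ ·) := by
    have := PySem.List.sorted_pairwise (xs := times) (key := fun t => t)
    simpa using this
  have hiff := pv_key ts times (PySem.List.sorted times (fun t => t) false) hpw
    (fun t => PySem.List.mem_sorted _ _ _ _)
  rw [pvALoop_eq_decide]
  show (if _ ∧ _ then true else if _ ∧ _ then true else false) = _
  split_ifs with h1 h2
  · exact (decide_eq_true (hiff.mp (Or.inl h1))).symm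
  · exact (decide_eq_true (hiff.mp (Or.inr h2))).symm
  · exact (decide_eq_false (fun hP => (not_or.mpr ⟨h1, h2⟩) (hiff.mpr hP))).symm

-- ===== VERDICT (by name: the statement is the Claim_ definition above) =====
theorem is_anomalous_node_range_spec : Claim_equal_is_anomalous_node_range := by
  intro d node ts _
  unfold Spec_is_anomalous_node_range is_anomalous_node_range is_anomalous_node_range_alt
  by_cases hts : ts < 150885 ∨ (PySem.Dict.mk d).contains node = false
  · rw [if_pos hts, if_pos hts]
  · rw [if_neg hts, if_neg hts]
    cases hg : (PySem.Dict.mk d).get? node with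
    | none => rfl
    | some times => exact (pv_inner_eq ts times).symm
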